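-- pv_equiv track=rewrite | github.com/gimboleo/studia_public | semestr 1/wdi/lista 8/zad4.py | zad4
-- ===== SOURCE A (Python) =====
-- def zad4(a,l,p):
--     if l == p: return a[l]
--     elif p-1 == l:
--         if a[l] < a[p]: return a[l]
--         else: return a[p]
--     else:
--         m1 = zad4(a,l,(l+p)//2)
--         m2 = zad4(a,(l+p)//2+1,p)
--         if m1 < m2: return m1
--         else: return m2
-- ===== SOURCE B (Python) =====
-- def zad4(a, l, p):
--     best = a[l]
--     for i in range(l + 1, p + 1):
--         if a[i] < best:
--             best = a[i]
--     return best
-- ===== Notes on version B (the rewrite author's own statement) =====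
-- stated objective: simpler
-- what changed: Replaces the divide-and-conquer recursion (split at the midpoint, recurse on both halves, combine with min) by a single flat left-to-right scan that keeps the running minimum.
import Mathlib
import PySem

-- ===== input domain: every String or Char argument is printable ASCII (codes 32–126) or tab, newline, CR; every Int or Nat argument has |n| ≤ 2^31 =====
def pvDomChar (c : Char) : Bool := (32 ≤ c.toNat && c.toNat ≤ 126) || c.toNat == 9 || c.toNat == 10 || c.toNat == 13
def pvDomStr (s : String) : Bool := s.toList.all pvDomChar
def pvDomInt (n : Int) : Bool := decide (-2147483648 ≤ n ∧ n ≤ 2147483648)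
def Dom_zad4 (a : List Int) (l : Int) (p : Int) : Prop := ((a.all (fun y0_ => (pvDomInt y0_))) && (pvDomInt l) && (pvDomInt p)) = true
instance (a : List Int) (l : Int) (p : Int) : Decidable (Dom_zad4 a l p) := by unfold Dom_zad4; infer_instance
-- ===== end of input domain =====

-- B replaces A's divide-and-conquer minimum by a single flat scan keeping the running minimum (simpler, O(1) space).


-- ===== PORT A =====
-- Literal port of A's recursion; a fuel parameter makes it total (Python recurses forever
-- for l > p, which Pre_ excludes; with fuel = (p - l).toNat the fuel never runs out on Pre_).
def zad4Fuel (a : List Int) : Nat → Int → Int → Int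
  | fuel, l, p =>
    if l = p then PySem.List.pyGetD a l 0
    else if p - 1 = l then
      if PySem.List.pyGetD a l 0 < PySem.List.pyGetD a p 0 then PySem.List.pyGetD a l 0
      else PySem.List.pyGetD a p 0
    else
      match fuel with
      | 0 => 0  -- unreachable on Pre_
      | f + 1 =>
        let m1 := zad4Fuel a f l (PySem.Int.floordiv (l + p) 2)
        let m2 := zad4Fuel a f (PySem.Int.floordiv (l + p) 2 + 1) p
        if m1 < m2 then m1 else m2

def zad4 (a : List Int) (l : Int) (p : Int) : Int := zad4Fuel a (p - l).toNat l p

-- ===== PORT B =====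
def zad4_alt (a : List Int) (l : Int) (p : Int) : Int :=
  (PySem.List.pyRange (l + 1) (p + 1) 1).foldl
    (fun best i => if PySem.List.pyGetD a i 0 < best then PySem.List.pyGetD a i 0 else best)
    (PySem.List.pyGetD a l 0)

-- ===== PRECONDITION & SPEC =====
-- Pre_ excludes l > p (Python A recurses without bound: RecursionError) and indices
-- outside Python's valid range -len(a) .. len(a)-1 (A raises IndexError there).
def Pre_zad4 (a : List Int) (l : Int) (p : Int) : Prop :=
  l ≤ p ∧ -(a.length : Int) ≤ l ∧ p < (a.length : Int)
instance (a : List Int) (l : Int) (p : Int) : Decidable (Pre_zad4 a l p) := by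
  unfold Pre_zad4; infer_instance

def pvWitness_zad4 : List Int × Int × Int := ([3, 1, 2], 0, 2)

def Spec_zad4 (a : List Int) (l : Int) (p : Int) (out : Int) : Prop := out = zad4_alt a l p
instance (a : List Int) (l : Int) (p : Int) (out : Int) : Decidable (Spec_zad4 a l p out) := by
  unfold Spec_zad4; infer_instance

-- ===== CLAIM (what is proved, stated in full; the proofs are below) =====
def Claim_equal_zad4 : Prop :=
  ∀ (a : List Int) (l : Int) (p : Int), Dom_zad4 a l p → Pre_zad4 a l p → Spec_zad4 a l p (zad4 a l p)

-- ===== LEMMAS AND PROOFS =====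

-- One folding step is an Int minimum.
lemma step_min (g : Int → Int) (b x : Int) :
    (if g x < b then g x else b) = min b (g x) := by
  rw [Int.min_def]; split_ifs <;> omega

-- Pulling a min out of the seed of B's fold.
lemma foldl_min_seed (g : Int → Int) (xs : List Int) :
    ∀ s t : Int,
      xs.foldl (fun b i => if g i < b then g i else b) (min s t)
        = min s (xs.foldl (fun b i => if g i < b then g i else b) t) := by
  induction xs with
  | nil => intro s t; rfl
  | cons x xs ih =>
    intro s t
    simp only [List.foldl_cons, step_min g] at ih ⊢
    rw [min_assoc]
    exact ih s (min t (g x))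

-- A (with enough fuel) equals B on l ≤ p.
lemma key (a : List Int) :
    ∀ (fuel : Nat) (l p : Int), l ≤ p → (p - l).toNat ≤ fuel →
      zad4Fuel a fuel l p = zad4_alt a l p := by
  intro fuel
  induction fuel with
  | zero =>
    intro l p hlp hf
    have : l = p := by omega
    subst this
    simp [zad4Fuel, zad4_alt, PySem.List.pyRange_one_eq_nil (by omega : l + 1 ≤ l + 1)]
  | succ f ih =>
    intro l p hlp hf
    by_cases h1 : l = p
    · subst h1
      simp [zad4Fuel, zad4_alt, PySem.List.pyRange_one_eq_nil (by omega : l + 1 ≤ l + 1)]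
    · by_cases h2 : p - 1 = l
      · have hp : p = l + 1 := by omega
        subst hp
        simp only [zad4Fuel, zad4_alt, if_neg h1, if_pos (by omega : l + 1 - 1 = l)]
        rw [show l + 1 + 1 = (l + 1) + 1 by ring, PySem.List.pyRange_one_singleton]
        simp only [List.foldl_cons, List.foldl_nil]
        split_ifs <;> omega
      · -- recursive case: l + 2 ≤ p
        have hlp2 : l + 2 ≤ p := by omega
        have hA : zad4Fuel a (f + 1) l p
            = (if zad4Fuel a f l (PySem.Int.floordiv (l + p) 2)
                  < zad4Fuel a f (PySem.Int.floordiv (l + p) 2 + 1) p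
               then zad4Fuel a f l (PySem.Int.floordiv (l + p) 2)
               else zad4Fuel a f (PySem.Int.floordiv (l + p) 2 + 1) p) := by
          conv_lhs => rw [zad4Fuel]
          simp only [if_neg h1, if_neg h2]
        set m := PySem.Int.floordiv (l + p) 2 with hm
        have hb := PySem.Int.floordiv_two_mid_bounds (le_of_lt (by omega : l < p))
        have hmp : m < p := by
          rw [hm, PySem.Int.floordiv_lt_iff_lt_mul (by omega : (0:Int) < 2)]; omega
        have hlm : l ≤ m := hb.1
        rw [hA, ih l m hlm (by omega), ih (m + 1) p (by omega) (by omega)]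
        rw [show (if zad4_alt a l m < zad4_alt a (m + 1) p
                  then zad4_alt a l m else zad4_alt a (m + 1) p)
                = min (zad4_alt a l m) (zad4_alt a (m + 1) p) from by
              rw [Int.min_def]; split_ifs <;> omega]
        -- now show B splits the same way
        unfold zad4_alt
        rw [PySem.List.pyRange_one_append (l + 1) (m + 1) (p + 1) (by omega) (by omega),
            List.foldl_append,
            PySem.List.pyRange_one_cons (by omega : m + 1 < p + 1)]
        simp only [List.foldl_cons]
        rw [step_min (fun i => PySem.List.pyGetD a i 0) _ (m + 1),
            foldl_min_seed (fun i => PySem.List.pyGetD a i 0)]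

-- ===== VERDICT (by name: the statement is the Claim_ definition above) =====
theorem zad4_spec : Claim_equal_zad4 := by
  intro a l p _hdom hpre
  unfold Spec_zad4 zad4
  exact key a (p - l).toNat l p hpre.1 (le_refl _)
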